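-- pv_equiv track=rewrite | github.com/DmitriyZykin/my_learn | Tracking Hits.py | reg_sum_hits
-- ===== SOURCE A (Python) =====
-- def reg_sum_hits(number_dice, number_sides_die):
--     matrix_numbers = []
--     count_dice = 1
--     list_sum = []
--     list_numbers = []
--     for k in range(number_sides_die):
--         list_sum.append(1)
--         list_numbers.append(k+1)
--
--     while count_dice < number_dice:
--
--         matrix_numbers.clear()
--         for h in range(number_sides_die):
--             matrix_numbers.append([0]*h + list_sum + [0]*(number_sides_die-1-h))
--
--         list_sum.clear()
--         for i in range(len(matrix_numbers[0])):
--             summ = 0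
--             for j in range(number_sides_die):
--                 summ += matrix_numbers[j][i]
--             list_sum.append(summ)
--
--         count_dice += 1
--         fist_number = list_numbers[0]
--         list_numbers.clear()
--         for f in range(fist_number + 1, count_dice * number_sides_die + 1):
--             list_numbers.append(f)
--
--     rez = []
--     for g in range(len(list_sum)):
--         rez.append([list_numbers[g],list_sum[g]])
--     return rez
-- ===== SOURCE B (Python) =====
-- def reg_sum_hits(number_dice, number_sides_die):
--     sides = number_sides_die
--     counts = [1] * sides
--     dice = 1
--     while dice < number_dice:
--         dice += 1
--         prefix = [0]
--         total = 0
--         for c in counts: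
--             total += c
--             prefix.append(total)
--         n = len(counts)
--         counts = [prefix[min(i + 1, n)] - prefix[max(i + 1 - sides, 0)]
--                   for i in range(n + sides - 1)]
--     return [[dice + i, c] for i, c in enumerate(counts)]
-- ===== Notes on version B (the rewrite author's own statement) =====
-- stated objective: faster
-- what changed: Replaces rebuilding a sides x (len+sides-1) shifted matrix and summing its columns on every die with a prefix-sum sliding-window convolution (each new count is a difference of two prefix sums); intended as faster, measured ~6-10x at the largest size both finished.
import Mathlib
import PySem

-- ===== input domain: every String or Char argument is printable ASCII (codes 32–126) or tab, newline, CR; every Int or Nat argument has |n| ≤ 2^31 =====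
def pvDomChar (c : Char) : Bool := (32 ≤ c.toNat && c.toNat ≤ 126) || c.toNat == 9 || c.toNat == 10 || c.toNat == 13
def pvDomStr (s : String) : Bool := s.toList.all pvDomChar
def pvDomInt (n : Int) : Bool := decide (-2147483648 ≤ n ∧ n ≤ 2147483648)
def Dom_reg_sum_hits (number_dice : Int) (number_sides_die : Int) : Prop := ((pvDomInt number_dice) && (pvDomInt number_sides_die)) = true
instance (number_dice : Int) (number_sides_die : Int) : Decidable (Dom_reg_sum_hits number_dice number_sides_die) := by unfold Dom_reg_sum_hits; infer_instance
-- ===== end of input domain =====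

-- B replaces A's per-die shifted-matrix rebuild + column sums by a prefix-sum
-- sliding-window convolution; intended as faster (a timing run measured ~6-10x
-- at the largest size both finished).

-- ===== PORT A =====
-- one body of A's while loop acting on list_sum (matrix build + column sums)
def aStep (ns : Int) (ls : List Int) : List Int :=
  let matrix := (PySem.List.pyRange 0 ns).map
      (fun h => List.replicate h.toNat (0 : Int) ++ ls ++ List.replicate (ns - 1 - h).toNat 0)
  (PySem.List.pyRange 0 ((PySem.List.pyGetD matrix 0 []).length : Int)).map
    (fun i => (PySem.List.pyRange 0 ns).foldl
      (fun summ j => summ + PySem.List.pyGetD (PySem.List.pyGetD matrix j []) i 0) 0)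

-- A's while loop; fuel = number of remaining iterations, condition checked as in Python
def aLoop (nd ns : Int) : Nat → Int → List Int → List Int → Int × List Int × List Int
  | 0, c, ls, ln => (c, ls, ln)
  | fuel + 1, c, ls, ln =>
    if c < nd then
      let ls' := aStep ns ls
      let c' := c + 1
      let first := PySem.List.pyGetD ln 0 0
      aLoop nd ns fuel c' ls' (PySem.List.pyRange (first + 1) (c' * ns + 1))
    else (c, ls, ln)

def reg_sum_hits (number_dice : Int) (number_sides_die : Int) : List (List Int) :=
  let init := (PySem.List.pyRange 0 number_sides_die).foldl
      (fun (st : List Int × List Int) k => (st.1 ++ [(1 : Int)], st.2 ++ [k + 1])) ([], [])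
  let r := aLoop number_dice number_sides_die (number_dice - 1).toNat 1 init.1 init.2
  (PySem.List.pyRange 0 (r.2.1.length : Int)).map
    (fun g => [PySem.List.pyGetD r.2.2 g 0, PySem.List.pyGetD r.2.1 g 0])

-- ===== PORT B =====
-- one body of B's while loop: prefix sums, then window differences
def bStep (sides : Int) (counts : List Int) : List Int :=
  let pr := counts.foldl (fun (st : List Int × Int) c => (st.1 ++ [st.2 + c], st.2 + c)) ([(0 : Int)], 0)
  let n : Int := (counts.length : Int)
  (PySem.List.pyRange 0 (n + sides - 1)).map
    (fun i => PySem.List.pyGetD pr.1 (min (i + 1) n) 0 - PySem.List.pyGetD pr.1 (max (i + 1 - sides) 0) 0)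

def bLoop (nd sides : Int) : Nat → Int → List Int → Int × List Int
  | 0, d, cs => (d, cs)
  | fuel + 1, d, cs => if d < nd then bLoop nd sides fuel (d + 1) (bStep sides cs) else (d, cs)

def reg_sum_hits_alt (number_dice : Int) (number_sides_die : Int) : List (List Int) :=
  let r := bLoop number_dice number_sides_die (number_dice - 1).toNat 1
      (List.replicate number_sides_die.toNat (1 : Int))
  (PySem.List.enumerate r.2 0).map (fun p => [r.1 + p.1, p.2])

-- ===== PRECONDITION & SPEC =====
-- Pre_ excludes exactly the inputs where A raises IndexError: number_dice ≥ 2 with a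
-- nonpositive number of sides (the matrix is empty and A indexes matrix_numbers[0]).
def Pre_reg_sum_hits (number_dice : Int) (number_sides_die : Int) : Prop :=
  2 ≤ number_dice → 1 ≤ number_sides_die
instance (number_dice : Int) (number_sides_die : Int) : Decidable (Pre_reg_sum_hits number_dice number_sides_die) := by unfold Pre_reg_sum_hits; infer_instance
def pvWitness_reg_sum_hits : Int × Int := (3, 2)

def Spec_reg_sum_hits (number_dice : Int) (number_sides_die : Int) (out : List (List Int)) : Prop := out = reg_sum_hits_alt number_dice number_sides_die
instance (number_dice : Int) (number_sides_die : Int) (out : List (List Int)) : Decidable (Spec_reg_sum_hits number_dice number_sides_die out) := by unfold Spec_reg_sum_hits; infer_instance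

-- ===== CLAIM (what is proved, stated in full; the proofs are below) =====
def Claim_equal_reg_sum_hits : Prop := ∀ (number_dice : Int) (number_sides_die : Int), Dom_reg_sum_hits number_dice number_sides_die → Pre_reg_sum_hits number_dice number_sides_die → Spec_reg_sum_hits number_dice number_sides_die (reg_sum_hits number_dice number_sides_die)

-- ===== LEMMAS AND PROOFS =====

-- B's prefix-building fold, characterised
lemma prefix_fold (L : List Int) : ∀ (p : List Int) (t : Int),
    (L.foldl (fun (st : List Int × Int) c => (st.1 ++ [st.2 + c], st.2 + c)) (p, t)).1
      = p ++ (List.range L.length).map (fun k => t + (L.take (k + 1)).sum) := by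
  induction L with
  | nil => simp
  | cons a L ih =>
    intro p t
    simp only [List.foldl_cons, ih, List.length_cons, List.range_succ_eq_map]
    simp [List.map_map, Function.comp_def, add_assoc]

lemma take_sum_succ (L : List Int) (k : Nat) :
    (L.take (k + 1)).sum = (L.take k).sum + L.getD k 0 := by
  by_cases h : k < L.length
  · rw [List.take_succ, List.sum_append, List.getD_eq_getElem L 0 h]
    simp [List.getElem?_eq_getElem h]
  · push_neg at h
    rw [List.take_of_length_le h, List.take_of_length_le (by omega), List.getD_eq_default _ _ h]
    simp

-- the prefix list evaluated at k ≤ |L|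
lemma prefix_getD (L : List Int) (k : Nat) (hk : k ≤ L.length) :
    ((0 : Int) :: (List.range L.length).map (fun k => 0 + (L.take (k + 1)).sum)).getD k 0
      = (L.take k).sum := by
  cases k with
  | zero => simp
  | succ k =>
    rw [List.getD_cons_succ]
    rw [List.getD_eq_getElem _ 0 (by simpa using by omega)]
    simp

-- the core window identity: the 0/1-masked row sum over j < sN equals a difference of prefix sums
lemma window_sum (L : List Int) (iN : Nat) : ∀ (sN : Nat),
    ((List.range sN).map (fun j => if j ≤ iN ∧ iN - j < L.length then L.getD (iN - j) 0 else 0)).sum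
      = (L.take (min (iN + 1) L.length)).sum - (L.take (iN + 1 - sN)).sum := by
  intro sN
  induction sN with
  | zero =>
    simp only [List.range_zero, List.map_nil, List.sum_nil, Nat.sub_zero]
    by_cases h : iN + 1 ≤ L.length
    · rw [min_eq_left h]; ring
    · push_neg at h
      rw [min_eq_right (by omega), List.take_of_length_le (by omega), List.take_of_length_le (by omega)]
      ring
  | succ sN ih =>
    rw [List.range_succ, List.map_append, List.sum_append, ih]
    simp only [List.map_cons, List.map_nil, List.sum_cons, List.sum_nil, add_zero]
    by_cases hj : sN ≤ iN
    · have h1 : iN + 1 - sN = (iN - sN) + 1 := by omega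
      have h2 : iN + 1 - (sN + 1) = iN - sN := by omega
      by_cases hl : iN - sN < L.length
      · rw [if_pos ⟨hj, hl⟩, h1, take_sum_succ, h2]
        ring
      · push_neg at hl
        rw [if_neg (by omega), h1, take_sum_succ, List.getD_eq_default _ _ hl, h2]
        ring
    · push_neg at hj
      rw [if_neg (by omega)]
      have : iN + 1 - sN = 0 := by omega
      have : iN + 1 - (sN + 1) = 0 := by omega
      simp_all

-- a shifted row of A's matrix, evaluated at index iN
lemma rowval (L : List Int) (jN r iN : Nat) :
    (List.replicate jN (0 : Int) ++ L ++ List.replicate r 0).getD iN 0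
      = if jN ≤ iN ∧ iN - jN < L.length then L.getD (iN - jN) 0 else 0 := by
  by_cases h0 : iN < jN + L.length
  · rw [List.getD_append _ _ _ _ (by simp; omega)]
    by_cases h1 : iN < jN
    · rw [List.getD_append _ _ _ _ (by simp; omega), if_neg (by omega)]
      simp [List.getD_eq_getElem?_getD, h1]
    · push_neg at h1
      rw [List.getD_append_right _ _ _ _ (by simp; omega), if_pos ⟨h1, by omega⟩]
      simp
  · push_neg at h0
    rw [List.getD_append_right _ _ _ _ (by simp; omega), if_neg (by omega)]
    simp only [List.getD_eq_getElem?_getD, List.getElem?_replicate, List.length_append,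
      List.length_replicate]
    split <;> rfl

-- one loop body of A equals one loop body of B
lemma step_eq (s : Int) (hs : 1 ≤ s) (L : List Int) : aStep s L = bStep s L := by
  simp only [aStep, bStep]
  rw [prefix_fold]
  set M := (PySem.List.pyRange 0 s).map
      (fun h => List.replicate h.toNat (0 : Int) ++ L ++ List.replicate (s - 1 - h).toNat 0) with hM
  have hrow : ∀ (k : Nat), k < s.toNat →
      PySem.List.pyGetD M ((k : Nat) : Int) []
        = List.replicate k (0 : Int) ++ L ++ List.replicate (s - 1 - k).toNat 0 := by
    intro k hk
    rw [hM, show s = ((s.toNat : Nat) : Int) from by omega]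
    have := PySem.List.pyGetD_map_pyRange
      (fun h => List.replicate h.toNat (0 : Int) ++ L ++ List.replicate (((s.toNat : Nat) : Int) - 1 - h).toNat 0)
      s.toNat k ([] : List Int) hk
    simpa using this
  have hrow0 := hrow 0 (by omega)
  simp only [Nat.cast_zero] at hrow0
  rw [hrow0]
  have hb : ((List.replicate 0 (0 : Int) ++ L ++ List.replicate (s - 1 - 0).toNat 0).length : Int)
      = (L.length : Int) + s - 1 := by
    simp; omega
  rw [hb]
  apply List.map_congr_left
  intro i hi
  rw [PySem.List.mem_pyRange_one] at hi
  rw [PySem.List.foldl_add]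
  have hconv : PySem.List.pyRange 0 s = (List.range s.toNat).map (fun k : Nat => (k : Int)) := by
    rw [PySem.List.pyRange_one, show ((s - 0).toNat) = s.toNat from by omega]
    exact List.map_congr_left (fun k _ => by omega)
  rw [hconv, List.map_map]
  have hmask : (List.range s.toNat).map
      ((fun j => PySem.List.pyGetD (PySem.List.pyGetD M j []) i 0) ∘ (fun k : Nat => (k : Int)))
      = (List.range s.toNat).map
        (fun j => if j ≤ i.toNat ∧ i.toNat - j < L.length then L.getD (i.toNat - j) 0 else 0) := by
    apply List.map_congr_left
    intro k hk
    rw [List.mem_range] at hk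
    simp only [Function.comp_def]
    rw [hrow k hk, PySem.List.pyGetD_of_nonneg _ _ hi.1]
    exact rowval L k (s - 1 - k).toNat i.toNat
  rw [hmask, window_sum L i.toNat s.toNat]
  have hhi : PySem.List.pyGetD
      (([(0 : Int)] ++ (List.range L.length).map (fun k => 0 + (L.take (k + 1)).sum)))
      (min (i + 1) (L.length : Int)) 0 = (L.take (min (i.toNat + 1) L.length)).sum := by
    rw [PySem.List.pyGetD_of_nonneg _ _ (by omega),
      show (min (i + 1) (L.length : Int)).toNat = min (i.toNat + 1) L.length from by omega]
    simpa using prefix_getD L (min (i.toNat + 1) L.length) (by omega)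
  have hlo : PySem.List.pyGetD
      (([(0 : Int)] ++ (List.range L.length).map (fun k => 0 + (L.take (k + 1)).sum)))
      (max (i + 1 - s) 0) 0 = (L.take (i.toNat + 1 - s.toNat)).sum := by
    rw [PySem.List.pyGetD_of_nonneg _ _ (by omega),
      show (max (i + 1 - s) 0).toNat = i.toNat + 1 - s.toNat from by omega]
    simpa using prefix_getD L (i.toNat + 1 - s.toNat) (by omega)
  rw [hhi, hlo, zero_add]

-- the two loops march in lockstep; A's list_numbers is range(count, count*sides+1)
lemma loops_eq (nd s : Int) (hs : 1 ≤ s) : ∀ (fuel : Nat) (c : Int) (ls : List Int), 1 ≤ c →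
    aLoop nd s fuel c ls (PySem.List.pyRange c (c * s + 1))
      = ((bLoop nd s fuel c ls).1, (bLoop nd s fuel c ls).2,
         PySem.List.pyRange (bLoop nd s fuel c ls).1 ((bLoop nd s fuel c ls).1 * s + 1)) := by
  intro fuel
  induction fuel with
  | zero => intro c ls hc; simp [aLoop, bLoop]
  | succ fuel ih =>
    intro c ls hc
    by_cases hcnd : c < nd
    · have hcs : c ≤ c * s := le_mul_of_one_le_right (by omega) hs
      have hcons := PySem.List.pyRange_one_cons (a := c) (b := c * s + 1) (by omega)
      simp only [aLoop, bLoop, if_pos hcnd]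
      rw [hcons]
      rw [PySem.List.pyGetD_of_nonneg _ _ (by omega : (0:Int) ≤ 0)]
      simp only [Int.toNat_zero, List.getD_cons_zero]
      rw [step_eq s hs]
      exact ih (c + 1) (bStep s ls) (by omega)
    · simp [aLoop, bLoop, if_neg hcnd]

-- length invariant of B's loop state
lemma bLoop_len (nd s : Int) (hs : 1 ≤ s) : ∀ (fuel : Nat) (c : Int) (cs : List Int), 1 ≤ c →
    ((cs.length : Int) = c * (s - 1) + 1) →
    ((((bLoop nd s fuel c cs).2.length : Int) = (bLoop nd s fuel c cs).1 * (s - 1) + 1)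
      ∧ 1 ≤ (bLoop nd s fuel c cs).1) := by
  intro fuel
  induction fuel with
  | zero => intro c cs hc hlen; simpa [bLoop] using ⟨hlen, hc⟩
  | succ fuel ih =>
    intro c cs hc hlen
    by_cases hcnd : c < nd
    · simp only [bLoop, if_pos hcnd]
      apply ih (c + 1) (bStep s cs) (by omega)
      have hmul : 0 ≤ (c + 1) * (s - 1) := mul_nonneg (by omega) (by omega)
      have hid : (cs.length : Int) + s - 1 = (c + 1) * (s - 1) + 1 := by rw [hlen]; ring
      have : ((bStep s cs).length : Int) = ((cs.length : Int) + s - 1).toNat := by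
        simp [bStep, PySem.List.length_pyRange_one]
      rw [this]
      omega
    · simpa [bLoop, if_neg hcnd] using ⟨hlen, hc⟩

-- main equivalence for sides ≥ 1 (any number_dice)
lemma main_pos (nd s : Int) (hs : 1 ≤ s) : reg_sum_hits nd s = reg_sum_hits_alt nd s := by
  unfold reg_sum_hits reg_sum_hits_alt
  rw [PySem.List.foldl_prod_mk (fun a (_ : Int) => a ++ [(1 : Int)]) (fun b k => b ++ [k + 1])]
  rw [PySem.List.foldl_append_singleton_eq_map (fun _ => (1 : Int)),
      PySem.List.foldl_append_singleton_eq_map (fun k => k + 1)]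
  simp only [List.nil_append]
  have h1 : (PySem.List.pyRange 0 s).map (fun _ => (1 : Int)) = List.replicate s.toNat 1 := by
    rw [List.map_const']
    simp [PySem.List.length_pyRange_one]
  have h2 : (PySem.List.pyRange 0 s).map (fun k => k + 1) = PySem.List.pyRange 1 (1 * s + 1) := by
    rw [PySem.List.pyRange_one 0 s, PySem.List.pyRange_one 1 (1 * s + 1), List.map_map]
    rw [show ((1 * s + 1) - 1).toNat = (s - 0).toNat by omega]
    apply List.map_congr_left
    intro k _
    simp only [Function.comp_def]
    omega
  rw [h1, h2]
  rw [loops_eq nd s hs (nd - 1).toNat 1 (List.replicate s.toNat 1) (le_refl 1)]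
  have hlen := bLoop_len nd s hs (nd - 1).toNat 1 (List.replicate s.toNat 1) (le_refl 1)
    (by simp; omega)
  set r := bLoop nd s (nd - 1).toNat 1 (List.replicate s.toNat 1) with hr
  obtain ⟨hlen, hd⟩ := hlen
  dsimp only
  rw [PySem.List.enumerate_eq_map_pyRange r.2 (0 : Int), List.map_map]
  simp only [PySem.List.len_eq]
  apply List.map_congr_left
  intro g hg
  rw [PySem.List.mem_pyRange_one] at hg
  simp only [Function.comp_def]
  have hds : r.1 * s - r.1 = r.1 * (s - 1) := by ring
  have hglt : g.toNat < (PySem.List.pyRange r.1 (r.1 * s + 1)).length := by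
    rw [PySem.List.length_pyRange_one]
    omega
  have : PySem.List.pyGetD (PySem.List.pyRange r.1 (r.1 * s + 1)) g 0 = r.1 + g := by
    rw [show g = ((g.toNat : Nat) : Int) by omega, PySem.List.pyGetD_natCast,
        List.getD_eq_getElem _ _ hglt, PySem.List.getElem_pyRange_one]
  rw [this]

-- ===== VERDICT (by name: the statement is the Claim_ definition above) =====
theorem reg_sum_hits_spec : Claim_equal_reg_sum_hits := by
  intro nd s _dom hpre
  unfold Spec_reg_sum_hits
  by_cases hs : 1 ≤ s
  · exact main_pos nd s hs
  · push_neg at hs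
    have hnd : nd < 2 := by by_contra h; push_neg at h; exact hs.not_ge (hpre h)
    have hf : (nd - 1).toNat = 0 := by omega
    have hsN : s.toNat = 0 := by omega
    have hnil : PySem.List.pyRange 0 s = [] := PySem.List.pyRange_one_eq_nil (by omega)
    simp [reg_sum_hits, reg_sum_hits_alt, hf, hsN, hnil, aLoop, bLoop]
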